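-- pv_equiv track=rewrite | github.com/DavidaaWoW/bigdata | 2/2_2.py | getNumberOutput
-- ===== SOURCE A (Python) =====
-- def getNumberOutput(digit):
--     list_ = []
--     for i in range(digit):
--         for j in range(i):
--             if(len(list_) == digit):
--                 return list_
--             list_.append(i)
--     return list_
-- ===== SOURCE B (Python) =====
-- def _isqrt(n):
--     # Newton's method for integer square root (no imports, exact)
--     x = n
--     y = (x + 1) // 2
--     while y < x:
--         x = y
--         y = (x + n // x) // 2
--     return x
--
-- def getNumberOutput(digit):
--     # closed form: output index k holds the smallest i with i*(i+1)//2 > k;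
--     # total available elements is digit*(digit-1)//2, truncated at digit
--     n = min(digit, digit * (digit - 1) // 2)
--     return [(_isqrt(8 * k + 1) - 1) // 2 + 1 for k in range(n)]
-- ===== Notes on version B (the rewrite author's own statement) =====
-- stated objective: alternative
-- what changed: Replaces A's nested loops (append value i once per inner iteration with a mid-loop length check and early return) by a closed form: the output length is min(digit, digit*(digit-1)//2) and the element at index k is (isqrt(8k+1)-1)//2+1, with a hand-written Newton integer square root since A imports nothing.
import Mathlib
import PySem

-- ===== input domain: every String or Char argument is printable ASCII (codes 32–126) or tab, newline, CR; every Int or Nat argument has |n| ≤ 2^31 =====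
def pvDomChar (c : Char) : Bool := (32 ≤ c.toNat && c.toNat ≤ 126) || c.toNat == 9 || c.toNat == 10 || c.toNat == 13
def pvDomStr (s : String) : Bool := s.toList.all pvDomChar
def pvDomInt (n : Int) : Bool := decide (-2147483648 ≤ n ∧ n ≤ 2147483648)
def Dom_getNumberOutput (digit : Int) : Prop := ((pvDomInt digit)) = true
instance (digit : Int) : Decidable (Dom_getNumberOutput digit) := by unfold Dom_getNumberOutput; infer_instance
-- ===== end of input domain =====

-- B replaces A's nested loop (value i appended i times, with a mid-loop length check and
-- early return) by a closed form: the length is min(digit, digit*(digit-1)//2) and the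
-- element at index k is (isqrt(8k+1)-1)//2+1, computed with a hand-written Newton integer
-- square root (A imports nothing, so B imports nothing). Objective: alternative algorithm.

-- ===== PORT A =====
-- inner 'for j in range(i)' loop: checks len==digit before each append, early return flag
def pvInnerA (digit i : Int) : List Int → List Int → List Int × Bool
  | [], acc => (acc, false)
  | _ :: js, acc =>
      if (acc.length : Int) = digit then (acc, true)
      else pvInnerA digit i js (acc ++ [i])

-- outer 'for i in range(digit)' loop
def pvOuterA (digit : Int) : List Int → List Int → List Int
  | [], acc => acc
  | i :: is, acc =>
      match pvInnerA digit i (PySem.List.pyRange 0 i 1) acc with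
      | (acc', true) => acc'
      | (acc', false) => pvOuterA digit is acc'

def getNumberOutput (digit : Int) : List Int :=
  pvOuterA digit (PySem.List.pyRange 0 digit 1) []

-- ===== PORT B =====
-- _isqrt's 'while y < x' Newton loop; its argument 8*k+1 is always a nonnegative int,
-- so Nat arithmetic is exact here (Python // on nonnegative ints = Nat division)
def pvIsqrtLoop (n : Nat) (x y : Nat) : Nat :=
  if y < x then pvIsqrtLoop n y ((y + n / y) / 2) else x
termination_by x
decreasing_by omega

-- _isqrt: x = n; y = (x + 1) // 2; loop; return x
def pvIsqrt (n : Nat) : Nat := pvIsqrtLoop n n ((n + 1) / 2)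

def getNumberOutput_alt (digit : Int) : List Int :=
  let n := min digit (PySem.Int.floordiv (digit * (digit - 1)) 2)
  (PySem.List.pyRange 0 n 1).map (fun k =>
    PySem.Int.floordiv ((pvIsqrt (8 * k + 1).toNat : Int) - 1) 2 + 1)

-- ===== PRECONDITION & SPEC =====
def Spec_getNumberOutput (digit : Int) (out : List Int) : Prop := out = getNumberOutput_alt digit
instance (digit : Int) (out : List Int) : Decidable (Spec_getNumberOutput digit out) := by unfold Spec_getNumberOutput; infer_instance

-- ===== CLAIM (what is proved, stated in full; the proofs are below) =====
def Claim_equal_getNumberOutput : Prop := ∀ (digit : Int), Dom_getNumberOutput digit → Spec_getNumberOutput digit (getNumberOutput digit)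

-- ===== LEMMAS AND PROOFS =====

-- Newton step never undershoots the integer square root
lemma pvNewton_ge_sqrt (n x : Nat) (hx : 1 ≤ x) : Nat.sqrt n ≤ (x + n / x) / 2 := by
  set s := Nat.sqrt n with hs
  rw [Nat.le_div_iff_mul_le (by omega : 0 < 2)]
  by_cases h : 2 * s ≤ x
  · have : 0 ≤ n / x := Nat.zero_le _
    omega
  · have hss : s * s ≤ n := Nat.sqrt_le n
    have hmul : 2 * s * x ≤ s * s + x * x := by
      zify
      nlinarith [sq_nonneg ((s : Int) - (x : Int))]
    have hsub : (2 * s - x) * x ≤ s * s := by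
      rw [Nat.sub_mul]
      apply Nat.sub_le_iff_le_add.mpr
      calc 2 * s * x ≤ s * s + x * x := hmul
        _ = s * s + x * x := rfl
    have hdiv : 2 * s - x ≤ n / x :=
      (Nat.le_div_iff_mul_le hx).mpr (le_trans hsub hss)
    omega

-- the loop, entered with the invariant, returns Nat.sqrt n
lemma pvIsqrtLoop_eq (n : Nat) (hn : 1 ≤ n) :
    ∀ x, Nat.sqrt n ≤ x → 1 ≤ x → pvIsqrtLoop n x ((x + n / x) / 2) = Nat.sqrt n := by
  intro x
  induction x using Nat.strong_induction_on with
  | _ x ih =>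
    intro hs hx
    rw [pvIsqrtLoop]
    by_cases hlt : (x + n / x) / 2 < x
    · simp only [hlt, if_true]
      have hsy : Nat.sqrt n ≤ (x + n / x) / 2 := pvNewton_ge_sqrt n x hx
      have hy1 : 1 ≤ (x + n / x) / 2 :=
        le_trans (Nat.sqrt_pos.mpr hn) hsy
      exact ih _ hlt hsy hy1
    · simp only [hlt, if_false]
      rw [Nat.not_lt] at hlt
      have h2 : x * 2 ≤ x + n / x := (Nat.le_div_iff_mul_le (by omega : 0 < 2)).mp hlt
      have h3 : x ≤ n / x := by omega
      have h4 : x * x ≤ n := (Nat.le_div_iff_mul_le (by omega : 0 < x)).mp h3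
      have h5 : x ≤ Nat.sqrt n := Nat.le_sqrt.mpr h4
      omega

lemma pvIsqrt_eq (n : Nat) : pvIsqrt n = Nat.sqrt n := by
  rcases Nat.eq_zero_or_pos n with h0 | h1
  · subst h0; simp [pvIsqrt, pvIsqrtLoop]
  · have hdd : n / n = 1 := Nat.div_self h1
    have : (n + 1) / 2 = (n + n / n) / 2 := by rw [hdd]
    rw [pvIsqrt, this]
    exact pvIsqrtLoop_eq n h1 n (Nat.sqrt_le_self n) h1

-- the closed-form per-index value
def pvF (k : Nat) : Nat := (Nat.sqrt (8 * k + 1) - 1) / 2 + 1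

lemma pvF_eq (m k : Nat) (hm : 1 ≤ m) (h1 : m * (m - 1) / 2 ≤ k) (h2 : k < m * (m + 1) / 2) :
    pvF k = m := by
  obtain ⟨m', rfl⟩ : ∃ m', m = m' + 1 := ⟨m - 1, by omega⟩
  obtain ⟨c1, hc1⟩ : Even ((m' + 1) * m') := by
    rw [Nat.mul_comm]; exact Nat.even_mul_succ_self m'
  obtain ⟨c2, hc2⟩ : Even ((m' + 1) * (m' + 2)) := Nat.even_mul_succ_self (m' + 1)
  have e1 : (m' + 1) * (m' + 1 - 1) = (m' + 1) * m' := by simp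
  rw [e1, hc1] at h1
  have e2 : (m' + 1) * (m' + 1 + 1) = (m' + 1) * (m' + 2) := by ring
  rw [e2, hc2] at h2
  have hk1 : c1 ≤ k := by omega
  have hk2 : k < c2 := by omega
  set s := Nat.sqrt (8 * k + 1) with hs
  have hlo : 2 * (m' + 1) - 1 ≤ s := by
    apply Nat.le_sqrt.mpr
    have : (2 * (m' + 1) - 1) * (2 * (m' + 1) - 1) = 4 * ((m' + 1) * m') + 1 := by
      have h : 2 * (m' + 1) - 1 = 2 * m' + 1 := by omega
      rw [h]; ring
    rw [this, hc1]; omega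
  have hhi : s < 2 * (m' + 1) + 1 := by
    apply Nat.sqrt_lt.mpr
    have : (2 * (m' + 1) + 1) * (2 * (m' + 1) + 1) = 4 * ((m' + 1) * (m' + 2)) + 1 := by ring
    rw [this, hc2]; omega
  unfold pvF
  omega

-- inner loop spec: append min(js.length, digit - len) copies, flag iff it hit the cap
lemma pvInnerA_spec (digit i : Int) :
    ∀ (js acc : List Int), (acc.length : Int) ≤ digit →
      pvInnerA digit i js acc =
        if ((acc.length : Int) + js.length ≤ digit) then
          (acc ++ List.replicate js.length i, false)
        else
          (acc ++ List.replicate (digit - acc.length).toNat i, true) := by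
  intro js
  induction js with
  | nil =>
    intro acc h
    simp [pvInnerA, h]
  | cons j js ih =>
    intro acc h
    rw [pvInnerA]
    by_cases heq : (acc.length : Int) = digit
    · rw [if_pos heq, if_neg (by simp only [List.length_cons]; push_cast; omega :
        ¬ ((acc.length : Int) + (j :: js).length ≤ digit))]
      have h0 : (digit - (acc.length : Int)).toNat = 0 := by omega
      simp [h0]
    · simp only [heq, if_false]
      rw [ih (acc ++ [i]) (by simp; omega)]
      have hlen : ((acc ++ [i]).length : Int) = (acc.length : Int) + 1 := by
        simp
      by_cases hc : (acc.length : Int) + (j :: js).length ≤ digit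
      · have hc' : ((acc ++ [i]).length : Int) + (js.length : Int) ≤ digit := by
          simp at hc ⊢; omega
        simp only [hc', if_true, hc, if_true]
        simp [List.replicate_succ]
      · have hc' : ¬ (((acc ++ [i]).length : Int) + (js.length : Int) ≤ digit) := by
          simp at hc ⊢; omega
        simp only [hc', if_false, hc, if_false]
        have h1 : (digit - ((acc ++ [i]).length : Int)).toNat + 1 = (digit - acc.length).toNat := by
          simp; omega
        rw [← h1]
        simp [List.replicate_succ, List.append_assoc]

def pvFlat (is : List Int) : List Int := is.flatMap (fun i => List.replicate i.toNat i)

lemma pvOuterA_spec (digit : Int) (hd : 0 ≤ digit) :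
    ∀ (is acc : List Int), acc.length ≤ digit.toNat →
      pvOuterA digit is acc = (acc ++ pvFlat is).take digit.toNat := by
  intro is
  induction is with
  | nil =>
    intro acc h
    simp [pvOuterA, pvFlat]
    exact h
  | cons i is ih =>
    intro acc h
    rw [pvOuterA, pvInnerA_spec digit i _ acc (by omega)]
    rw [PySem.List.length_pyRange_one]
    have hflat : pvFlat (i :: is) = List.replicate i.toNat i ++ pvFlat is := by
      simp [pvFlat]
    by_cases hc : (acc.length : Int) + ((i - 0).toNat : Int) ≤ digit
    · simp only [hc, if_true]
      rw [ih (acc ++ List.replicate (i - 0).toNat i) (by simp; omega)]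
      have : (i - 0).toNat = i.toNat := by omega
      rw [this] at *
      rw [hflat]
      simp [List.append_assoc]
    · simp only [hc, if_false]
      have hi0 : (i - 0).toNat = i.toNat := by omega
      rw [hi0] at hc
      rw [hflat]
      have ha : acc.length ≤ digit.toNat := h
      have hcap : digit.toNat < acc.length + i.toNat := by omega
      rw [List.take_append, List.take_of_length_le ha,
          List.take_append, List.take_replicate]
      have h1 : min (digit.toNat - acc.length) i.toNat = digit.toNat - acc.length := by omega
      have h2 : digit.toNat - acc.length - (List.replicate i.toNat i).length = 0 := by
        simp; omega
      rw [h1, h2]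
      have h3 : (digit - (acc.length : Int)).toNat = digit.toNat - acc.length := by omega
      simp [h3]

def pvFull (m : Nat) : List Int := (List.range m).flatMap (fun i => List.replicate i (i : Int))

lemma pvS_succ (m : Nat) : (m + 1) * m / 2 = m * (m - 1) / 2 + m := by
  obtain ⟨c, hc⟩ : Even (m * (m - 1)) := by
    rcases Nat.eq_zero_or_pos m with h0 | h1
    · subst h0; simp
    · obtain ⟨m', rfl⟩ : ∃ m', m = m' + 1 := ⟨m - 1, by omega⟩
      rw [Nat.mul_comm]; simpa using Nat.even_mul_succ_self m'
  have he : (m + 1) * m = m * (m - 1) + 2 * m := by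
    cases m with
    | zero => simp
    | succ m' => simp only [Nat.add_sub_cancel]; ring
  rw [he, hc]
  omega

lemma pvFull_length (m : Nat) : (pvFull m).length = m * (m - 1) / 2 := by
  induction m with
  | zero => simp [pvFull]
  | succ m ih =>
    have : pvFull (m + 1) = pvFull m ++ List.replicate m (m : Int) := by
      simp [pvFull, List.range_succ]
    have hred : (m + 1) * (m + 1 - 1) = (m + 1) * m := by simp
    rw [this, List.length_append, ih, List.length_replicate, hred, pvS_succ]

lemma pvFull_getElem (m : Nat) : ∀ (k : Nat) (hk : k < (pvFull m).length),
    (pvFull m)[k] = (pvF k : Int) := by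
  induction m with
  | zero => intro k hk; simp [pvFull] at hk
  | succ m ih =>
    intro k hk
    have hsplit : pvFull (m + 1) = pvFull m ++ List.replicate m (m : Int) := by
      simp [pvFull, List.range_succ]
    have hlen : (pvFull m).length = m * (m - 1) / 2 := pvFull_length m
    rcases Nat.lt_or_ge k (pvFull m).length with hlt | hge
    · simp only [hsplit] at hk ⊢
      rw [List.getElem_append_left hlt]
      exact ih k hlt
    · simp only [hsplit] at hk ⊢
      rw [List.getElem_append_right hge]
      rw [List.getElem_replicate]
      have hm1 : 1 ≤ m := by
        by_contra hm
        have : m = 0 := by omega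
        subst this
        simp at hk
        omega
      have hub : k < m * (m + 1) / 2 := by
        have hk' : k < (pvFull m).length + m := by
          simpa [List.length_append] using hk
        have : m * (m + 1) = (m + 1) * m := by ring
        rw [this, pvS_succ]
        omega
      rw [pvF_eq m k hm1 (by omega) hub]

lemma pvAlt_eq (digit : Int) (hd : 0 ≤ digit) :
    getNumberOutput_alt digit =
      (List.range (min digit.toNat (digit.toNat * (digit.toNat - 1) / 2))).map
        (fun k => (pvF k : Int)) := by
  set d := digit.toNat with hdn
  have hdig : digit = (d : Int) := (Int.toNat_of_nonneg hd).symm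
  have hprod : digit * (digit - 1) = ((d * (d - 1) : Nat) : Int) := by
    rcases Nat.eq_zero_or_pos d with h0 | h1
    · rw [hdig, h0]; norm_num
    · rw [hdig]; push_cast [h1]; ring
  have hfd : PySem.Int.floordiv (digit * (digit - 1)) 2 = ((d * (d - 1) / 2 : Nat) : Int) := by
    rw [hprod]; exact_mod_cast PySem.Int.floordiv_natCast (d * (d - 1)) 2
  have hmin : min digit (PySem.Int.floordiv (digit * (digit - 1)) 2)
      = ((min d (d * (d - 1) / 2) : Nat) : Int) := by
    rw [hfd, hdig]; exact_mod_cast (Nat.cast_min d (d * (d - 1) / 2)).symm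
  have hstep : getNumberOutput_alt digit =
      (PySem.List.pyRange 0 (min digit (PySem.Int.floordiv (digit * (digit - 1)) 2)) 1).map
        (fun k => PySem.Int.floordiv ((pvIsqrt (8 * k + 1).toNat : Int) - 1) 2 + 1) := by
    simp only [getNumberOutput_alt]
  rw [hstep, hmin, PySem.List.pyRange_one, List.map_map]
  have hn : ((min d (d * (d - 1) / 2) : Nat) : Int) - 0 = ((min d (d * (d - 1) / 2) : Nat) : Int) := by ring
  rw [hn, Int.toNat_natCast]
  apply List.map_congr_left
  intro k _
  simp only [Function.comp_apply]
  have ht : ((8 * ((0 : Int) + (k : Nat)) + 1)).toNat = 8 * k + 1 := by omega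
  rw [ht, pvIsqrt_eq]
  set s := Nat.sqrt (8 * k + 1) with hs
  have hs1 : 1 ≤ s := Nat.sqrt_pos.mpr (by omega)
  have hc : ((s : Int) - 1) = ((s - 1 : Nat) : Int) := by omega
  rw [hc]
  have hfd2 : PySem.Int.floordiv ((s - 1 : Nat) : Int) 2 = (((s - 1) / 2 : Nat) : Int) :=
    by exact_mod_cast PySem.Int.floordiv_natCast (s - 1) 2
  rw [hfd2]
  unfold pvF
  push_cast
  omega

lemma pvFlat_pyRange (digit : Int) :
    pvFlat (PySem.List.pyRange 0 digit 1) = pvFull digit.toNat := by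
  rw [PySem.List.pyRange_one]
  simp [pvFlat, pvFull, List.flatMap_map]

-- ===== VERDICT (by name: the statement is the Claim_ definition above) =====
theorem getNumberOutput_spec : Claim_equal_getNumberOutput := by
  intro digit _
  unfold Spec_getNumberOutput
  by_cases hd : 0 ≤ digit
  · have hA : getNumberOutput digit = (pvFull digit.toNat).take digit.toNat := by
      unfold getNumberOutput
      rw [pvOuterA_spec digit hd _ [] (by simp)]
      rw [List.nil_append, pvFlat_pyRange digit]
    rw [hA, pvAlt_eq digit hd]
    apply List.ext_getElem
    · simp [pvFull_length]
    · intro k h1 h2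
      rw [List.getElem_take, pvFull_getElem, List.getElem_map, List.getElem_range]
  · rw [Int.not_le] at hd
    have hA : getNumberOutput digit = [] := by
      unfold getNumberOutput
      rw [PySem.List.pyRange_one_eq_nil (by omega)]
      rfl
    have hB : getNumberOutput_alt digit = [] := by
      have hle : min digit (PySem.Int.floordiv (digit * (digit - 1)) 2) ≤ digit := min_le_left _ _
      have hstep : getNumberOutput_alt digit =
          (PySem.List.pyRange 0 (min digit (PySem.Int.floordiv (digit * (digit - 1)) 2)) 1).map
            (fun k => PySem.Int.floordiv ((pvIsqrt (8 * k + 1).toNat : Int) - 1) 2 + 1) := by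
        simp only [getNumberOutput_alt]
      rw [hstep, PySem.List.pyRange_one_eq_nil (by omega)]
      rfl
    rw [hA, hB]
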